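-- pv_equiv track=rewrite | github.com/youitiyamayami/Google-Maps-Assistant-Tool | modules/route_parser.py | _split_legs_by_waypoints
-- ===== SOURCE A (Python) =====
-- from typing import List, Optional
--
-- def _first_index_containing(lines: List[str], token: str) -> Optional[int]:
--     token = token.strip()
--     if not token:
--         return None
--     for i, ln in enumerate(lines):
--         if token in ln:
--             return i
--     return None
--
-- def _split_legs_by_waypoints(lines: List[str], origin: str, waypoints: List[str], destination: str) -> List[List[str]]:
--     """
--     分割の安定性向上：各マーカー（origin, waypoints..., destination）の
--     最初に出現する位置で区切る。繰り返し出現に影響されない。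
--     マーカーのうち見つかったものだけで分割し、最低1レグは返す。
--     """
--     anchors: List[int] = []
--     for mark in [origin] + waypoints + [destination]:
--         idx = _first_index_containing(lines, mark) if mark else None
--         if idx is not None:
--             anchors.append(idx)
--
--     if not anchors:
--         return [lines]
--
--     anchors = sorted(set(anchors))
--     # 先頭/末尾を明示
--     if anchors[0] != 0:
--         anchors = [0] + anchors
--     if anchors[-1] != len(lines) - 1:
--         anchors = anchors + [len(lines) - 1]
--
--     # スライスを作成
--     legs: List[List[str]] = []
--     for i in range(len(anchors) - 1):
--         start = anchors[i]
--         end = anchors[i + 1]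
--         seg = [x for x in lines[start:end + 1] if x.strip()]
--         if seg:
--             legs.append(seg)
--
--     # 期待本数より極端に多い場合（ノイズ混入）は1レグにまとめる
--     expected = max(1, len(waypoints) + 1)
--     if len(legs) > expected * 2:  # しきい値は緩め
--         return [lines]
--
--     return legs if legs else [lines]
-- ===== SOURCE B (Python) =====
-- def _split_legs_by_waypoints(lines, origin, waypoints, destination):
--     # One scan over lines finds every marker's first occurrence at once;
--     # the scan yields the anchor indices already sorted and distinct.
--     pending = [t for t in (m.strip() for m in [origin] + waypoints + [destination]) if t]
--     anchors = []
--     for i, ln in enumerate(lines):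
--         remaining = []
--         for t in pending:
--             if t in ln:
--                 if not anchors or anchors[-1] != i:
--                     anchors.append(i)
--             else:
--                 remaining.append(t)
--         pending = remaining
--
--     if not anchors:
--         return [lines]
--
--     if anchors[0] != 0:
--         anchors = [0] + anchors
--     if anchors[-1] != len(lines) - 1:
--         anchors = anchors + [len(lines) - 1]
--
--     legs = []
--     for a, b in zip(anchors, anchors[1:]):
--         seg = [x for x in lines[a:b + 1] if x.strip()]
--         if seg:
--             legs.append(seg)
--
--     expected = max(1, len(waypoints) + 1)
--     if len(legs) > expected * 2:
--         return [lines]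
--
--     return legs if legs else [lines]
-- ===== Notes on version B (the rewrite author's own statement) =====
-- stated objective: alternative
-- what changed: A searches the lines once per marker (a separate first-index scan for origin, each waypoint, and destination); B makes a single left-to-right pass over the lines, keeping the set of not-yet-found stripped markers and emitting each line index at which some pending marker first occurs, which yields the same sorted distinct anchor set; the leg slicing, blank-line filter and noise threshold are unchanged (B pairs anchors by zip instead of indexing by range).
import Mathlib
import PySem

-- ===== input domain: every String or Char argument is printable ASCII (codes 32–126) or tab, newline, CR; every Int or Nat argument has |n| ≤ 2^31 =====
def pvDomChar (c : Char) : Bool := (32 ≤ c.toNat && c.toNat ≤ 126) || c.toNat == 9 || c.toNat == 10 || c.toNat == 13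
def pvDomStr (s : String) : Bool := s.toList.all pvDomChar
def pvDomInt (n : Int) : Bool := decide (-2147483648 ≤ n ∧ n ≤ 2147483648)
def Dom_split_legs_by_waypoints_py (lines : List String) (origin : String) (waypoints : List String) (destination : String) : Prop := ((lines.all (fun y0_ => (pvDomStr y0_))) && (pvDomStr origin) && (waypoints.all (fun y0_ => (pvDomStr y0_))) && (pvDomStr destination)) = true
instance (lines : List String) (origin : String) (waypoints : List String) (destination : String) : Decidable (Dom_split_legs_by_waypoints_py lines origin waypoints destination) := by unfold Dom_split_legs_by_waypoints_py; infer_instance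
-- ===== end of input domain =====

-- B replaces A's one-scan-per-marker anchor search by a single left-to-right scan over the
-- lines that finds all markers' first occurrences at once (objective: alternative); the
-- return value is proved identical.

-- ===== PORT A =====
-- helper: the loop 'for i, ln in enumerate(lines): if token in ln: return i'
def firstIndexLoop (token : String) (pairs : List (Int × String)) : Option Int :=
  match pairs with
  | [] => none
  | (i, ln) :: rest => if PySem.Str.isIn token ln then some i else firstIndexLoop token rest

-- port of _first_index_containing
def first_index_containing (lines : List String) (token : String) : Option Int :=
  let token := PySem.Str.strip token
  if PySem.Str.len token = 0 then none
  else firstIndexLoop token (PySem.List.enumerate lines 0)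

def split_legs_by_waypoints_py (lines : List String) (origin : String) (waypoints : List String) (destination : String) : List (List String) :=
  let marks := [origin] ++ waypoints ++ [destination]
  let anchors : List Int := marks.foldl (fun anchors mark =>
      match (if PySem.Str.len mark ≠ 0 then first_index_containing lines mark else none) with
      | some j => anchors ++ [j]
      | none => anchors) []
  if anchors = [] then [lines] else
  let anchors := PySem.List.sorted (PySem.Set.ofList anchors) (fun x => x) false
  let anchors := if PySem.List.pyGetD anchors 0 0 ≠ 0 then [0] ++ anchors else anchors
  let anchors := if PySem.List.pyGetD anchors (-1) 0 ≠ (lines.length : Int) - 1 then anchors ++ [(lines.length : Int) - 1] else anchors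
  let legs : List (List String) := (PySem.List.pyRange 0 ((anchors.length : Int) - 1) 1).foldl (fun legs i =>
      let start := PySem.List.pyGetD anchors i 0
      let «end» := PySem.List.pyGetD anchors (i + 1) 0
      let seg := (PySem.List.slice lines (some start) (some («end» + 1))).filter (fun x => PySem.Str.len (PySem.Str.strip x) != 0)
      if seg = [] then legs else legs ++ [seg]) []
  let expected := max 1 ((waypoints.length : Int) + 1)
  if (legs.length : Int) > expected * 2 then [lines]
  else if legs = [] then [lines] else legs

-- ===== PORT B =====
-- inner loop over the still-pending markers for one line
def scanInner (ln : String) (i : Int) (pending : List String) (anchors : List Int) (remaining : List String) : List Int × List String :=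
  match pending with
  | [] => (anchors, remaining)
  | t :: ts =>
    if PySem.Str.isIn t ln then
      scanInner ln i ts (if anchors = [] ∨ PySem.List.pyGetD anchors (-1) 0 ≠ i then anchors ++ [i] else anchors) remaining
    else
      scanInner ln i ts anchors (remaining ++ [t])

-- outer loop: 'for i, ln in enumerate(lines): …'
def scanLines (pairs : List (Int × String)) (pending : List String) (anchors : List Int) : List Int :=
  match pairs with
  | [] => anchors
  | (i, ln) :: rest =>
    let r := scanInner ln i pending anchors []
    scanLines rest r.2 r.1

def split_legs_by_waypoints_py_alt (lines : List String) (origin : String) (waypoints : List String) (destination : String) : List (List String) :=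
  let pending := (([origin] ++ waypoints ++ [destination]).map PySem.Str.strip).filter (fun t => PySem.Str.len t != 0)
  let anchors := scanLines (PySem.List.enumerate lines 0) pending []
  if anchors = [] then [lines] else
  let anchors := if PySem.List.pyGetD anchors 0 0 ≠ 0 then [0] ++ anchors else anchors
  let anchors := if PySem.List.pyGetD anchors (-1) 0 ≠ (lines.length : Int) - 1 then anchors ++ [(lines.length : Int) - 1] else anchors
  let legs : List (List String) := (anchors.zip anchors.tail).foldl (fun legs ab =>
      let seg := (PySem.List.slice lines (some ab.1) (some (ab.2 + 1))).filter (fun x => PySem.Str.len (PySem.Str.strip x) != 0)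
      if seg = [] then legs else legs ++ [seg]) []
  let expected := max 1 ((waypoints.length : Int) + 1)
  if (legs.length : Int) > expected * 2 then [lines]
  else if legs = [] then [lines] else legs

-- ===== PRECONDITION & SPEC =====
def Spec_split_legs_by_waypoints_py (lines : List String) (origin : String) (waypoints : List String) (destination : String) (out : List (List String)) : Prop := out = split_legs_by_waypoints_py_alt lines origin waypoints destination
instance (lines : List String) (origin : String) (waypoints : List String) (destination : String) (out : List (List String)) : Decidable (Spec_split_legs_by_waypoints_py lines origin waypoints destination out) := by unfold Spec_split_legs_by_waypoints_py; infer_instance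

-- ===== CLAIM (what is proved, stated in full; the proofs are below) =====
def Claim_equal_split_legs_by_waypoints_py : Prop := ∀ (lines : List String) (origin : String) (waypoints : List String) (destination : String), Dom_split_legs_by_waypoints_py lines origin waypoints destination → Spec_split_legs_by_waypoints_py lines origin waypoints destination (split_legs_by_waypoints_py lines origin waypoints destination)

-- ===== LEMMAS AND PROOFS =====

-- A's anchor loop is a filterMap over the stripped non-empty markers
theorem foldl_anchors_eq (lines : List String) (marks : List String) (acc : List Int) :
    marks.foldl (fun anchors mark =>
      match (if PySem.Str.len mark ≠ 0 then first_index_containing lines mark else none) with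
      | some j => anchors ++ [j]
      | none => anchors) acc
    = acc ++ ((marks.map PySem.Str.strip).filter (fun t => PySem.Str.len t != 0)).filterMap
        (fun t => firstIndexLoop t (PySem.List.enumerate lines 0)) := by
  induction marks generalizing acc with
  | nil => simp
  | cons m ms ih =>
    simp only [List.foldl_cons, List.map_cons]
    by_cases h0 : PySem.Str.len (PySem.Str.strip m) = 0
    · have hnone : (if PySem.Str.len m ≠ 0 then first_index_containing lines m else none) = (none : Option Int) := by
        by_cases hm : m = ""
        · simp [hm]
        · have h0' : PySem.Chars.strip m.toList = [] := by simpa using h0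
          simp [first_index_containing, hm, h0']
      rw [hnone]
      rw [ih acc]
      have hdrop : (PySem.Str.len (PySem.Str.strip m) != 0) = false := by simpa using h0
      simp only [List.filter_cons, hdrop]
      simp
    · have h0' : ¬ PySem.Chars.strip m.toList = [] := by simpa using h0
      have hm : ¬ m = "" := by
        intro he
        apply h0'
        rw [he]
        rfl
      have hfic : (if PySem.Str.len m ≠ 0 then first_index_containing lines m else none)
          = firstIndexLoop (PySem.Str.strip m) (PySem.List.enumerate lines 0) := by
        simp [first_index_containing, hm, h0']
      rw [hfic]
      have hkeep : (PySem.Str.len (PySem.Str.strip m) != 0) = true := by simpa using h0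
      simp only [List.filter_cons, hkeep, if_pos, List.filterMap_cons]
      cases hj : firstIndexLoop (PySem.Str.strip m) (PySem.List.enumerate lines 0) with
    | none => exact ih acc
    | some j => rw [ih (acc ++ [j])]; simp

-- the model of B's scan
def modelScan (pairs : List (Int × String)) (pending : List String) : List Int :=
  match pairs with
  | [] => []
  | (i, ln) :: rest =>
    (if pending.any (fun t => PySem.Str.isIn t ln) then [i] else [])
      ++ modelScan rest (pending.filter (fun t => !PySem.Str.isIn t ln))

theorem scanInner_stay (ln : String) (i : Int) (P : List String) (anchors : List Int) (rem : List String)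
    (hne : anchors ≠ []) (hlast : PySem.List.pyGetD anchors (-1) 0 = i) :
    scanInner ln i P anchors rem = (anchors, rem ++ P.filter (fun t => !PySem.Str.isIn t ln)) := by
  induction P generalizing rem with
  | nil => simp [scanInner]
  | cons t ts ih =>
    by_cases hm : PySem.Chars.isIn t.toList ln.toList
    · simp [scanInner, hm, hne, hlast, ih]
    · simp [scanInner, hm, ih]

theorem scanInner_spec (ln : String) (i : Int) (P : List String) (anchors : List Int) (rem : List String)
    (h : ∀ x ∈ anchors, x < i) :
    scanInner ln i P anchors rem =
      ((if P.any (fun t => PySem.Str.isIn t ln) then anchors ++ [i] else anchors),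
        rem ++ P.filter (fun t => !PySem.Str.isIn t ln)) := by
  induction P generalizing rem with
  | nil => simp [scanInner]
  | cons t ts ih =>
    by_cases hm : PySem.Chars.isIn t.toList ln.toList
    · have hcond : anchors = [] ∨ PySem.List.pyGetD anchors (-1) 0 ≠ i := by
        rcases eq_or_ne anchors [] with h0 | h0
        · exact Or.inl h0
        · refine Or.inr ?_
          have := PySem.List.pyGetD_neg_one (xs := anchors) (d := 0) h0
          have hmem : anchors.getLast h0 ∈ anchors := List.getLast_mem h0
          have := h _ hmem
          omega
      have hstay := scanInner_stay ln i ts (anchors ++ [i]) rem (by simp)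
        (PySem.List.pyGetD_neg_one_append_singleton anchors i 0)
      simp [scanInner, hm, hcond, hstay]
    · rw [show scanInner ln i (t :: ts) anchors rem = scanInner ln i ts anchors (rem ++ [t]) from by
        simp [scanInner, hm]]
      rw [ih (rem ++ [t])]
      simp [hm]

theorem scanLines_eq_modelScan (lines : List String) (s : Int) (P : List String) (anchors : List Int)
    (h : ∀ x ∈ anchors, x < s) :
    scanLines (PySem.List.enumerate lines s) P anchors = anchors ++ modelScan (PySem.List.enumerate lines s) P := by
  induction lines generalizing s P anchors with
  | nil => simp [scanLines, modelScan, PySem.List.enumerate_nil]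
  | cons ln rest ih =>
    rw [PySem.List.enumerate_cons]
    simp only [scanLines, modelScan]
    rw [scanInner_spec ln s P anchors [] h]
    dsimp only
    rw [ih (s + 1) _ _ (by
      intro x hx
      split at hx
      · rcases List.mem_append.1 hx with h1 | h1
        · have := h x h1; omega
        · simp at h1
          omega
      · have := h x hx; omega)]
    split <;> simp

theorem mem_modelScan_lb (lines : List String) (s : Int) (P : List String) (j : Int)
    (hj : j ∈ modelScan (PySem.List.enumerate lines s) P) : s ≤ j := by
  induction lines generalizing s P with
  | nil => simp [modelScan, PySem.List.enumerate_nil] at hj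
  | cons ln rest ih =>
    rw [PySem.List.enumerate_cons] at hj
    simp only [modelScan] at hj
    rcases List.mem_append.1 hj with h1 | h1
    · split at h1 <;> simp at h1; omega
    · have := ih (s + 1) _ h1; omega

theorem mem_modelScan_iff (lines : List String) (s : Int) (P : List String) (j : Int) :
    j ∈ modelScan (PySem.List.enumerate lines s) P ↔
      ∃ t ∈ P, firstIndexLoop t (PySem.List.enumerate lines s) = some j := by
  induction lines generalizing s P with
  | nil => simp [modelScan, firstIndexLoop, PySem.List.enumerate_nil]
  | cons ln rest ih =>
    rw [PySem.List.enumerate_cons]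
    simp only [modelScan, firstIndexLoop, List.mem_append]
    constructor
    · rintro (h1 | h1)
      · split at h1 <;> simp at h1
        next hany =>
          obtain ⟨t, ht, hin⟩ := List.any_eq_true.1 hany
          have hin' : PySem.Chars.isIn t.toList ln.toList = true := by simpa using hin
          exact ⟨t, ht, by simp [hin', h1]⟩
      · obtain ⟨t, ht, hloop⟩ := (ih (s + 1) _).1 h1
        have ht' := List.mem_filter.1 ht
        refine ⟨t, ht'.1, ?_⟩
        have hf : PySem.Chars.isIn t.toList ln.toList = false := by simpa using ht'.2
        simp [hf, hloop]
    · rintro ⟨t, ht, hloop⟩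
      by_cases hin : PySem.Str.isIn t ln
      · rw [if_pos hin] at hloop
        simp at hloop
        left
        rw [if_pos (List.any_eq_true.2 ⟨t, ht, hin⟩)]
        simp [hloop]
      · rw [if_neg hin] at hloop
        right
        exact (ih (s + 1) _).2 ⟨t, List.mem_filter.2 ⟨ht, by simp at hin ⊢; exact hin⟩, hloop⟩

theorem modelScan_pairwise (lines : List String) (s : Int) (P : List String) :
    (modelScan (PySem.List.enumerate lines s) P).Pairwise (· < ·) := by
  induction lines generalizing s P with
  | nil => simp [modelScan, PySem.List.enumerate_nil]
  | cons ln rest ih =>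
    rw [PySem.List.enumerate_cons]
    simp only [modelScan]
    refine List.pairwise_append.2 ⟨?_, ih (s + 1) _, ?_⟩
    · split <;> simp
    · intro a ha b hb
      have hb' := mem_modelScan_lb rest (s + 1) _ b hb
      split at ha <;> simp at ha
      omega

-- B's scan computes sorted(set(A's anchors))
theorem scan_eq_sorted (lines : List String) (P : List Int) (toks : List String)
    (hP : P = toks.filterMap (fun t => firstIndexLoop t (PySem.List.enumerate lines 0))) :
    PySem.List.sorted (PySem.Set.ofList P) (fun x => x) false
      = scanLines (PySem.List.enumerate lines 0) toks [] := by
  rw [scanLines_eq_modelScan lines 0 toks [] (by simp), List.nil_append]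
  apply PySem.List.sorted_eq_of_perm_of_pairwise_lt
  · have hnd : (modelScan (PySem.List.enumerate lines 0) toks).Nodup :=
      (modelScan_pairwise lines 0 toks).imp (fun h => ne_of_lt h)
    rw [List.perm_ext_iff_of_nodup hnd (PySem.Set.nodup_ofList P)]
    intro a
    rw [mem_modelScan_iff, PySem.Set.mem_ofList, hP, List.mem_filterMap]
  · exact modelScan_pairwise lines 0 toks

-- the legs loop: index loop over range = loop over zip(anchors, anchors[1:])
theorem legs_fold_eq (anchors : List Int) (g : List (List String) → Int → Int → List (List String)) (init : List (List String)) :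
    (PySem.List.pyRange 0 ((anchors.length : Int) - 1) 1).foldl
      (fun legs i => g legs (PySem.List.pyGetD anchors i 0) (PySem.List.pyGetD anchors (i + 1) 0)) init
    = (anchors.zip anchors.tail).foldl (fun legs ab => g legs ab.1 ab.2) init := by
  have hmap : (PySem.List.pyRange 0 ((anchors.length : Int) - 1) 1).map
      (fun i => (PySem.List.pyGetD anchors i 0, PySem.List.pyGetD anchors (i + 1) 0))
      = anchors.zip anchors.tail := by
    apply List.ext_getElem
    · simp only [List.length_map, PySem.List.length_pyRange_one, List.length_zip, List.length_tail]
      omega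
    · intro k h1 h2
      have hk : k < ((anchors.length : Int) - 1 - 0).toNat := by
        simpa [PySem.List.length_pyRange_one] using h1
      have hk' : k + 1 < anchors.length := by omega
      rw [List.getElem_map, PySem.List.getElem_pyRange_one 0 _ k (by simpa [PySem.List.length_pyRange_one] using hk)]
      rw [List.getElem_zip, List.getElem_tail]
      have e1 : PySem.List.pyGetD anchors (0 + (k : Int)) 0 = anchors[k] := by
        rw [PySem.List.pyGetD_eq_getElem anchors 0 (by omega) (by omega)]
        simp
      have e2 : PySem.List.pyGetD anchors (0 + (k : Int) + 1) 0 = anchors[k + 1] := by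
        rw [PySem.List.pyGetD_eq_getElem anchors 0 (by omega) (by omega)]
        congr 1
        omega
      rw [e1, e2]
  rw [← hmap, List.foldl_map]

-- ===== VERDICT (by name: the statement is the Claim_ definition above) =====
theorem sorted_ofList_eq_nil_iff (l : List Int) :
    (PySem.List.sorted (PySem.Set.ofList l) (fun x => x) false = []) ↔ l = [] := by
  constructor
  · intro h
    rw [List.eq_nil_iff_forall_not_mem]
    intro a ha
    have := (PySem.List.sorted_perm (PySem.Set.ofList l) (fun x => x) false).mem_iff.2
      ((PySem.Set.mem_ofList l a).2 ha)
    rw [h] at this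
    simp at this
  · intro h
    subst h
    rfl

theorem legs_fold_eq_inst (lines : List String) (anchors : List Int) :
    (PySem.List.pyRange 0 ((anchors.length : Int) - 1) 1).foldl (fun legs i =>
      if List.filter (fun x => PySem.Str.len (PySem.Str.strip x) != 0)
           (PySem.List.slice lines (some (PySem.List.pyGetD anchors i 0))
             (some (PySem.List.pyGetD anchors (i + 1) 0 + 1))) = []
      then legs
      else legs ++ [List.filter (fun x => PySem.Str.len (PySem.Str.strip x) != 0)
           (PySem.List.slice lines (some (PySem.List.pyGetD anchors i 0))
             (some (PySem.List.pyGetD anchors (i + 1) 0 + 1)))]) []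
    = (anchors.zip anchors.tail).foldl (fun legs ab =>
      if List.filter (fun x => PySem.Str.len (PySem.Str.strip x) != 0)
           (PySem.List.slice lines (some ab.1) (some (ab.2 + 1))) = []
      then legs
      else legs ++ [List.filter (fun x => PySem.Str.len (PySem.Str.strip x) != 0)
           (PySem.List.slice lines (some ab.1) (some (ab.2 + 1)))]) [] :=
  legs_fold_eq anchors (fun legs a b =>
      if List.filter (fun x => PySem.Str.len (PySem.Str.strip x) != 0)
           (PySem.List.slice lines (some a) (some (b + 1))) = []
      then legs
      else legs ++ [List.filter (fun x => PySem.Str.len (PySem.Str.strip x) != 0)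
           (PySem.List.slice lines (some a) (some (b + 1)))]) []

theorem split_legs_by_waypoints_py_spec : Claim_equal_split_legs_by_waypoints_py := by
  intro lines origin waypoints destination _
  unfold Spec_split_legs_by_waypoints_py split_legs_by_waypoints_py split_legs_by_waypoints_py_alt
  dsimp only
  rw [foldl_anchors_eq lines ([origin] ++ waypoints ++ [destination]) []]
  rw [List.nil_append]
  rw [← scan_eq_sorted lines _ _ rfl]
  simp only [sorted_ofList_eq_nil_iff]
  rw [legs_fold_eq_inst lines]
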